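-- pv_equiv track=rewrite | github.com/RTEMS/rtems-source-builder | source-builder/sb/config.py | _check_bool
-- ===== SOURCE A (Python) =====
-- def _check_bool(value):
--     istrue = None
--     if value.isdigit():
--         if int(value) == 0:
--             istrue = False
--         else:
--             istrue = True
--     else:
--         if type(value) is str and len(value) == 2 and value[0] == '!':
--             istrue = _check_bool(value[1])
--             if type(istrue) is bool:
--                 istrue = not istrue
--     return istrue
-- ===== SOURCE B (Python) =====
-- def _check_bool(value):
--     negate = False
--     s = value
--     if type(value) is str and len(value) == 2 and value[0] == '!':
--         negate = True
--         s = value[1]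
--     if s.isdigit():
--         istrue = int(s) != 0
--         return (not istrue) if negate else istrue
--     return None
-- ===== Notes on version B (the rewrite author's own statement) =====
-- stated objective: simpler
-- what changed: Replaces the one-level self-recursion with a normalize-then-parse pass: an optional leading negation mark on a length-2 string is stripped into a boolean negate flag, then the string is parsed exactly once.
import Mathlib
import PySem

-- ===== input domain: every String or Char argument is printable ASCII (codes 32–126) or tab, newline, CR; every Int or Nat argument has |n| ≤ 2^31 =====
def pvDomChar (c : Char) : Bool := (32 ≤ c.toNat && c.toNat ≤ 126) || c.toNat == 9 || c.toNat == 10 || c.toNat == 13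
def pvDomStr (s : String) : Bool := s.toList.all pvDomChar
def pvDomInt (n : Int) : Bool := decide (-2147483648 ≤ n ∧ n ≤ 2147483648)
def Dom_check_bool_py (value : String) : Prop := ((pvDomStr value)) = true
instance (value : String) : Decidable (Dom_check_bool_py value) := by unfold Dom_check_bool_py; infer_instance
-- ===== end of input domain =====

-- B replaces A's one-level self-recursion by a single normalize-then-parse pass (the leading negation mark stripped into a negate flag); objective: simpler.

-- ===== PORT A =====
-- A's recursion, on the string's character list (value[1] is the single-char string [c1]).
def checkBoolGoA (cs : List Char) : Option Bool :=
  if PySem.Chars.strIsdigit cs then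
    if PySem.Int.ofChars? cs = some 0 then some false else some true
  else
    if h : cs.length = 2 ∧ PySem.List.pyGet? cs 0 = some '!' then
      match PySem.List.pyGet? cs 1 with
      | some c1 =>
        match checkBoolGoA [c1] with
        | some b => some (!b)      -- 'if type(istrue) is bool: istrue = not istrue'
        | none => none
      | none => none
    else none
termination_by cs.length
decreasing_by simp; omega

def check_bool_py (value : String) : Option Bool := checkBoolGoA value.toList

-- ===== PORT B =====
def check_bool_py_alt (value : String) : Option Bool :=
  let (negate, s) :=
    match value.toList with
    | ['!', c] => (true, [c])
    | cs => (false, cs)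
  if PySem.Chars.strIsdigit s then
    let istrue := decide (PySem.Int.ofChars? s ≠ some 0)
    some (if negate then !istrue else istrue)
  else none

-- ===== PRECONDITION & SPEC =====
def Spec_check_bool_py (value : String) (out : Option Bool) : Prop := out = check_bool_py_alt value
instance (value : String) (out : Option Bool) : Decidable (Spec_check_bool_py value out) := by unfold Spec_check_bool_py; infer_instance

-- ===== CLAIM (what is proved, stated in full; the proofs are below) =====
def Claim_equal_check_bool_py : Prop := ∀ (value : String), Dom_check_bool_py value → Spec_check_bool_py value (check_bool_py value)

-- ===== LEMMAS AND PROOFS =====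

-- '!' is not a digit, so a "!x" string never takes A's digit branch.
theorem strIsdigit_bang (c : Char) : PySem.Chars.strIsdigit ['!', c] = false := by
  simp [PySem.Chars.strIsdigit, PySem.Chars.isdigit]

theorem checkBoolGoA_single (c : Char) :
    checkBoolGoA [c] =
      (if PySem.Chars.strIsdigit [c] then
        (if PySem.Int.ofChars? [c] = some 0 then some false else some true) else none) := by
  unfold checkBoolGoA
  split <;> simp

theorem checkBoolGoA_eq (cs : List Char) :
    checkBoolGoA cs =
      (let (negate, s) :=
        match cs with
        | ['!', c] => (true, [c])
        | cs => (false, cs)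
      if PySem.Chars.strIsdigit s then
        some (if negate then !(decide (PySem.Int.ofChars? s ≠ some 0))
              else decide (PySem.Int.ofChars? s ≠ some 0))
      else none) := by
  match cs with
  | [] => simp [checkBoolGoA, PySem.Chars.strIsdigit]
  | [a] =>
    rw [checkBoolGoA_single]
    split <;> simp_all <;> split <;> simp_all
  | a :: [b] =>
    by_cases ha : a = '!'
    · subst ha
      unfold checkBoolGoA
      rw [strIsdigit_bang]
      simp only [Bool.false_eq_true, if_false]
      rw [dif_pos (by simp [PySem.List.pyGet?, PySem.List.pyIdx?])]
      have h1 : PySem.List.pyGet? ['!', b] 1 = some b := by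
        simp [PySem.List.pyGet?, PySem.List.pyIdx?]
      rw [h1]
      dsimp only
      rw [checkBoolGoA_single]
      by_cases hd : PySem.Chars.strIsdigit [b] = true
      · simp only [hd, if_true]
        split <;> split_ifs at * <;> simp_all
      · simp [hd]
    · have hmatch : (match [a, b] with
          | ['!', c] => (true, [c])
          | cs => (false, cs) : Bool × List Char) = (false, [a, b]) := by
        split
        · next heq => simp_all
        · rfl
      rw [hmatch]
      unfold checkBoolGoA
      by_cases hd : PySem.Chars.strIsdigit [a, b] = true
      · rw [if_pos hd]
        simp only [hd, if_true]
        split <;> split_ifs at * <;> simp_all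
      · rw [if_neg hd]
        rw [dif_neg (by
          rintro ⟨-, hg⟩
          simp [PySem.List.pyGet?, PySem.List.pyIdx?] at hg
          exact ha hg)]
        simp [hd]
  | a :: b :: c :: rest =>
    unfold checkBoolGoA
    have hl : (a :: b :: c :: rest).length ≠ 2 := by simp
    split
    · split <;> simp_all
    · rw [dif_neg (fun ⟨h2, _⟩ => hl h2)]
      simp_all

-- ===== VERDICT (by name: the statement is the Claim_ definition above) =====
theorem check_bool_py_spec : Claim_equal_check_bool_py := by
  intro value _
  unfold Spec_check_bool_py check_bool_py check_bool_py_alt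
  exact checkBoolGoA_eq value.toList
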